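-- pv_equiv track=rewrite | github.com/akraeva/procode-advanced-python | src/module_10.py | m_10_1_3
-- ===== SOURCE A (Python) =====
-- def m_10_1_3(data: str):
--     hunters, criminals = (set(line.split()) for line in data.strip().split("\n"))
--     common = hunters & criminals
--     purebred = hunters - criminals
--     return (
--         f"Общие: {{{', '.join(sorted(common))}}}\n"
--         f"Чистые охотники: {{{', '.join(sorted(purebred))}}}"
--     )
-- ===== SOURCE B (Python) =====
-- def m_10_1_3(data: str):
--     hline, cline = data.strip().split("\n")
--     criminals = set(cline.split())
--     common = []
--     purebred = []
--     seen = set()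
--     for name in hline.split():
--         if name in seen:
--             continue
--         seen.add(name)
--         target = common if name in criminals else purebred
--         i = 0
--         while i < len(target) and target[i] < name:
--             i += 1
--         target.insert(i, name)
--     return (
--         f"Общие: {{{', '.join(common)}}}\n"
--         f"Чистые охотники: {{{', '.join(purebred)}}}"
--     )
-- ===== Notes on version B (the rewrite author's own statement) =====
-- stated objective: alternative
-- what changed: B never builds the hunters set nor calls sorted() or any set operation on it: it makes a single pass over the hunter tokens, skips duplicates with a seen-set, and inserts each new name directly at its sorted position (a scan-and-insert insertion sort) into the common or purebred output list according to membership in criminals.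
import Mathlib
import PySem

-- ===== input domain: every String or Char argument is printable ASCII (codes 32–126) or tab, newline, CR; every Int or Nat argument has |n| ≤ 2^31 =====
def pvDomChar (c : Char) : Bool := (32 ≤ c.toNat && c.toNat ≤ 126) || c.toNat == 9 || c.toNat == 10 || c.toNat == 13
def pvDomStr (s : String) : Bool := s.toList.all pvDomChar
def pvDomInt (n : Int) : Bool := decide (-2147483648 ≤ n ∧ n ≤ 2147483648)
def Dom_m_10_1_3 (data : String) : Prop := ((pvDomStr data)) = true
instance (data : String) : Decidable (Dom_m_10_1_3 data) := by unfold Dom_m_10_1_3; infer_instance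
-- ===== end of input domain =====

-- B replaces A's set intersection/difference and the two sorted() calls with one pass over the
-- hunter tokens that skips duplicates and inserts each new name at its sorted position into the
-- common or purebred list (objective: alternative).

-- ===== PORT A =====
-- strip then split on the newline separator; the separator is nonempty, so split? is always some (getD [] is never taken).
def m_10_1_3 (data : String) : String :=
  match (PySem.Str.split? (PySem.Str.strip data) "\n").getD [] with
  | [l1, l2] =>
    let hunters : PySem.Set String := PySem.Set.ofList (PySem.Str.split₀ l1)
    let criminals : PySem.Set String := PySem.Set.ofList (PySem.Str.split₀ l2)
    let common := PySem.Set.inter hunters criminals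
    let purebred := PySem.Set.diff hunters criminals
    "Общие: {" ++ PySem.Str.join ", " (PySem.List.sorted common (fun x => x)) ++
      "}\nЧистые охотники: {" ++
      PySem.Str.join ", " (PySem.List.sorted purebred (fun x => x)) ++ "}"
  | _ => ""  -- ValueError (unpacking): excluded by Pre_m_10_1_3

-- ===== PORT B =====
-- the scan-and-insert step:  i = 0; while i < len(target) and target[i] < name: i += 1; target.insert(i, name)
def pvInsPos : List String → String → List String
  | [], name => [name]
  | x :: xs, name => if x < name then x :: pvInsPos xs name else name :: x :: xs

-- one iteration of B's loop body over the state (common, purebred, seen)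
def pvStep (criminals : PySem.Set String)
    (st : List String × List String × PySem.Set String) (name : String) :
    List String × List String × PySem.Set String :=
  if PySem.Set.contains st.2.2 name then st
  else
    let seen := PySem.Set.add st.2.2 name
    if PySem.Set.contains criminals name then (pvInsPos st.1 name, st.2.1, seen)
    else (st.1, pvInsPos st.2.1 name, seen)

def m_10_1_3_alt (data : String) : String :=
  match (PySem.Str.split? (PySem.Str.strip data) "\n").getD [] with
  | [] => ""  -- ValueError (unpacking): excluded by Pre_m_10_1_3
  | l1 :: rest1 =>
    match rest1 with
    | [] => ""  -- ValueError (one line): excluded by Pre_m_10_1_3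
    | l2 :: rest2 =>
      if rest2.isEmpty then
        let criminals : PySem.Set String := PySem.Set.ofList (PySem.Str.split₀ l2)
        let st := (PySem.Str.split₀ l1).foldl (pvStep criminals) ([], [], PySem.Set.empty)
        "Общие: {" ++ PySem.Str.join ", " st.1 ++
          "}\nЧистые охотники: {" ++
          PySem.Str.join ", " st.2.1 ++ "}"
      else ""  -- ValueError (too many lines): excluded by Pre_m_10_1_3

-- ===== PRECONDITION & SPEC =====
-- A raises ValueError unless stripping data and splitting on the newline separator yields exactly two lines; Pre_ admits exactly those inputs.
def Pre_m_10_1_3 (data : String) : Prop :=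
  (((PySem.Str.split? (PySem.Str.strip data) "\n").getD []).length = 2)
instance (data : String) : Decidable (Pre_m_10_1_3 data) := by unfold Pre_m_10_1_3; infer_instance
def pvWitness_m_10_1_3 : String := "h1 h2 h3\nh2 c1"

def Spec_m_10_1_3 (data : String) (out : String) : Prop := out = m_10_1_3_alt data
instance (data : String) (out : String) : Decidable (Spec_m_10_1_3 data out) := by unfold Spec_m_10_1_3; infer_instance

-- ===== CLAIM (what is proved, stated in full; the proofs are below) =====
def Claim_equal_m_10_1_3 : Prop := ∀ (data : String), Dom_m_10_1_3 data → Pre_m_10_1_3 data → Spec_m_10_1_3 data (m_10_1_3 data)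

-- ===== LEMMAS AND PROOFS =====

-- scan-and-insert places the new element somewhere: the result is a rearrangement of name :: l
theorem pvInsPos_perm (l : List String) (x : String) : (pvInsPos l x).Perm (x :: l) := by
  induction l with
  | nil => simp [pvInsPos]
  | cons y ys ih =>
    simp only [pvInsPos]
    by_cases h : y < x
    · simp only [h, if_true]
      exact (ih.cons y).trans (List.Perm.swap x y ys)
    · simp [h]

-- scan-and-insert keeps a strictly increasing list strictly increasing when x is new
theorem pvInsPos_pairwise (l : List String) (x : String)
    (h : l.Pairwise (· < ·)) (hx : x ∉ l) : (pvInsPos l x).Pairwise (· < ·) := by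
  induction l with
  | nil => simp [pvInsPos]
  | cons y ys ih =>
    simp only [pvInsPos]
    rcases List.pairwise_cons.mp h with ⟨hy, hys⟩
    by_cases hlt : y < x
    · simp only [hlt, if_true]
      refine List.pairwise_cons.mpr ⟨?_, ih hys (fun hm => hx (List.mem_cons_of_mem y hm))⟩
      intro z hz
      rcases List.mem_cons.mp ((pvInsPos_perm ys x).mem_iff.mp hz) with h1 | h2
      · exact h1 ▸ hlt
      · exact hy z h2
    · have hne : x ≠ y := fun he => hx (he ▸ List.mem_cons_self)
      have hxy : x < y := lt_of_le_of_ne (not_lt.mp hlt) hne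
      simp only [hlt, if_false]
      refine List.pairwise_cons.mpr ⟨?_, h⟩
      intro z hz
      rcases List.mem_cons.mp hz with h1 | h2
      · exact h1 ▸ hxy
      · exact lt_trans hxy (hy z h2)

-- loop invariant: common/purebred are strictly sorted rearrangements of the two filters of seen
theorem pvLoop_inv (crim : PySem.Set String) (ts : List String)
    (c p : List String) (s : PySem.Set String)
    (hc : c.Perm (s.filter (fun x => PySem.Set.contains crim x)))
    (hp : p.Perm (s.filter (fun x => !PySem.Set.contains crim x)))
    (hco : c.Pairwise (· < ·)) (hpo : p.Pairwise (· < ·)) :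
    (ts.foldl (pvStep crim) (c, p, s)).1.Perm
        ((PySem.Set.update s ts).filter (fun x => PySem.Set.contains crim x)) ∧
    (ts.foldl (pvStep crim) (c, p, s)).2.1.Perm
        ((PySem.Set.update s ts).filter (fun x => !PySem.Set.contains crim x)) ∧
    (ts.foldl (pvStep crim) (c, p, s)).1.Pairwise (· < ·) ∧
    (ts.foldl (pvStep crim) (c, p, s)).2.1.Pairwise (· < ·) := by
  induction ts generalizing c p s with
  | nil => exact ⟨hc, hp, hco, hpo⟩
  | cons t ts ih =>
    have hupd : PySem.Set.update s (t :: ts) = PySem.Set.update (PySem.Set.add s t) ts := rfl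
    simp only [List.foldl_cons, hupd]
    by_cases hmem : t ∈ s
    · have hct : PySem.Set.contains s t = true := by simpa using hmem
      rw [PySem.Set.add_of_mem hmem]
      simp only [pvStep, hct, if_true]
      exact ih c p s hc hp hco hpo
    · have hct : PySem.Set.contains s t = false := by simpa using hmem
      have hadd : PySem.Set.add s t = s ++ [t] := PySem.Set.add_of_not_mem hmem
      simp only [pvStep, hct, Bool.false_eq_true, if_false]
      by_cases hcr : PySem.Set.contains crim t = true
      · -- t goes to common
        have hnotc : t ∉ c := fun h =>
          hmem (List.mem_filter.mp (hc.mem_iff.mp h)).1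
        simp only [hcr, if_true]
        apply ih
        · refine (pvInsPos_perm c t).trans ?_
          rw [hadd, List.filter_append]
          simp only [List.filter_cons, hcr, if_true, List.filter_nil]
          exact (hc.cons t).trans (List.perm_append_singleton t _).symm
        · rw [hadd, List.filter_append]
          have htc : t ∈ crim := by simpa using hcr
          simpa [htc] using hp
        · exact pvInsPos_pairwise c t hco hnotc
        · exact hpo
      · -- t goes to purebred
        have hnotp : t ∉ p := fun h =>
          hmem (List.mem_filter.mp (hp.mem_iff.mp h)).1
        simp only [hcr]
        apply ih
        · rw [hadd, List.filter_append]
          have htc : t ∉ crim := by simpa using hcr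
          simpa [htc] using hc
        · refine (pvInsPos_perm p t).trans ?_
          rw [hadd, List.filter_append]
          have htc : t ∉ crim := by simpa using hcr
          have hstep := (hp.cons t).trans (List.perm_append_singleton t _).symm
          simpa [htc] using hstep
        · exact hco
        · exact pvInsPos_pairwise p t hpo hnotp

theorem m_10_1_3_eq (data : String) (h : Pre_m_10_1_3 data) :
    m_10_1_3 data = m_10_1_3_alt data := by
  unfold Pre_m_10_1_3 at h
  unfold m_10_1_3 m_10_1_3_alt
  have h' : ((PySem.Str.split? (PySem.Str.strip data) "\n").getD []).length = 2 := h
  match hl : (PySem.Str.split? (PySem.Str.strip data) "\n").getD [] with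
  | [] => simp [hl] at h'
  | [_] => simp [hl] at h'
  | _ :: _ :: _ :: _ => simp [hl] at h'
  | [l1, l2] =>
    simp only [List.isEmpty_nil, if_true]
    set ts := PySem.Str.split₀ l1 with hts
    set crim := PySem.Set.ofList (PySem.Str.split₀ l2) with hcrim
    have hof : PySem.Set.ofList ts = PySem.Set.update PySem.Set.empty ts := rfl
    have hinv := pvLoop_inv crim ts [] [] PySem.Set.empty
      (by simp [PySem.Set.empty]) (by simp [PySem.Set.empty])
      (List.Pairwise.nil) (List.Pairwise.nil)
    obtain ⟨hc, hp, hco, hpo⟩ := hinv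
    have hcommon : PySem.List.sorted (PySem.Set.inter (PySem.Set.ofList ts) crim) (fun x => x) =
        (ts.foldl (pvStep crim) ([], [], PySem.Set.empty)).1 := by
      apply PySem.List.sorted_eq_of_perm_of_pairwise_lt
      · exact hof ▸ hc
      · exact hco
    have hpure : PySem.List.sorted (PySem.Set.diff (PySem.Set.ofList ts) crim) (fun x => x) =
        (ts.foldl (pvStep crim) ([], [], PySem.Set.empty)).2.1 := by
      apply PySem.List.sorted_eq_of_perm_of_pairwise_lt
      · exact hof ▸ hp
      · exact hpo
    rw [hcommon, hpure]

-- ===== VERDICT (by name: the statement is the Claim_ definition above) =====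
theorem m_10_1_3_spec : Claim_equal_m_10_1_3 := by
  intro data _ hpre
  exact m_10_1_3_eq data hpre
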